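-- pv_equiv track=rewrite | github.com/AnnaIasinskaia/Usatges_de_Barcelona | pipeline_unified.py | build_allowed_right_corpora_by_left
-- ===== SOURCE A (Python) =====
-- from typing import Any, Dict, List, Optional, Sequence, Tuple
--
-- def build_allowed_right_corpora_by_left(
--     left_corpora: Sequence[str],
--     right_corpora: Sequence[str],
--     mappings: Sequence[Tuple[List[str], List[str]]],
-- ) -> Dict[str, set]:
--     allowed: Dict[str, set] = {lc: set() for lc in left_corpora}
--     for frm, to in mappings:
--         to_set = set(to)
--         for lc in frm:
--             if lc in allowed:
--                 allowed[lc].update(to_set)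
--     for lc in left_corpora:
--         if not allowed[lc]:
--             allowed[lc].update(right_corpora)
--     return allowed
-- ===== SOURCE B (Python) =====
-- def build_allowed_right_corpora_by_left(left_corpora, right_corpora, mappings):
--     def allowed_for(lc):
--         s = set()
--         for frm, to in mappings:
--             if lc in frm:
--                 s.update(to)
--         return s or set(right_corpora)
--     return {lc: allowed_for(lc) for lc in left_corpora}
-- ===== Notes on version B (the rewrite author's own statement) =====
-- stated objective: alternative
-- what changed: Replaces A's build-index-then-fill strategy (pre-seed a dict of empty sets, sweep mappings once updating matching keys in place, then a second sweep filling empty sets) by a per-key dict comprehension: each left corpus independently scans the mappings and collects its allowed set, with the full-right-corpora fallback inline.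
import Mathlib
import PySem

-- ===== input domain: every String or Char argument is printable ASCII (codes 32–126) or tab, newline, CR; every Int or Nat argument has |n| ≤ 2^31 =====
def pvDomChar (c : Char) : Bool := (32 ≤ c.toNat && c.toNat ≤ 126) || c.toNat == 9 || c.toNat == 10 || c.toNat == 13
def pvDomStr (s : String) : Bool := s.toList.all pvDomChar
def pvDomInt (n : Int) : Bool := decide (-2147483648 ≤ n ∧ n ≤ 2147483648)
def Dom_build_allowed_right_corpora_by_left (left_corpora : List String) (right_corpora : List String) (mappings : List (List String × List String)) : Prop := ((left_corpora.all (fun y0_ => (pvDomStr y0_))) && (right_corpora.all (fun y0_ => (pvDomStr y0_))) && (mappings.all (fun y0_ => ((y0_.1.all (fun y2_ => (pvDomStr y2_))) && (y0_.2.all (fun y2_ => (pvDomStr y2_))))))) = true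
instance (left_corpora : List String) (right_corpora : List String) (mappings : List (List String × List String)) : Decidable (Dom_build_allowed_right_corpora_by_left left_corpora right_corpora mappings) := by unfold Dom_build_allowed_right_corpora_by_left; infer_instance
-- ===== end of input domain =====

-- B replaces A's index-then-fill dict construction by an independent per-left-corpus scan of
-- the mappings (a dict comprehension); a different decomposition, not faster.


-- ===== PORT A =====
-- allowed = {lc: set() for lc in left_corpora}; one sweep over mappings updating the sets of
-- the matching keys in place; a final sweep replacing still-empty sets by set(right_corpora).
def build_allowed_right_corpora_by_left (left_corpora : List String) (right_corpora : List String) (mappings : List (List String × List String)) : List (String × List String) :=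
  let allowed : PySem.Dict String (PySem.Set String) :=
    left_corpora.foldl (fun d lc => d.insert lc PySem.Set.empty) PySem.Dict.empty
  let allowed :=
    mappings.foldl (fun d p =>
      let toSet := PySem.Set.ofList p.2
      p.1.foldl (fun d lc =>
        if d.contains lc then
          d.modify lc PySem.Set.empty (fun s => PySem.Set.update s toSet)
        else d) d) allowed
  let allowed :=
    left_corpora.foldl (fun d lc =>
      if (d.getD lc PySem.Set.empty).isEmpty then
        d.modify lc PySem.Set.empty (fun s => PySem.Set.update s right_corpora)
      else d) allowed
  allowed.items

-- ===== PORT B =====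
-- helper allowed_for(lc): scan all mappings, union the targets of every mapping whose source
-- side contains lc; fall back to set(right_corpora) if nothing matched.
def pvAllowedFor (right_corpora : List String) (mappings : List (List String × List String)) (lc : String) : PySem.Set String :=
  let s := mappings.foldl
    (fun s p => if p.1.contains lc then PySem.Set.update s p.2 else s) PySem.Set.empty
  if s.isEmpty then PySem.Set.ofList right_corpora else s

-- {lc: allowed_for(lc) for lc in left_corpora}
def build_allowed_right_corpora_by_left_alt (left_corpora : List String) (right_corpora : List String) (mappings : List (List String × List String)) : List (String × List String) :=
  (left_corpora.foldl
    (fun d lc => d.insert lc (pvAllowedFor right_corpora mappings lc))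
    (PySem.Dict.empty : PySem.Dict String (PySem.Set String))).items

-- ===== PRECONDITION & SPEC =====
def Spec_build_allowed_right_corpora_by_left (left_corpora : List String) (right_corpora : List String) (mappings : List (List String × List String)) (out : List (String × List String)) : Prop := out = build_allowed_right_corpora_by_left_alt left_corpora right_corpora mappings
instance (left_corpora : List String) (right_corpora : List String) (mappings : List (List String × List String)) (out : List (String × List String)) : Decidable (Spec_build_allowed_right_corpora_by_left left_corpora right_corpora mappings out) := by unfold Spec_build_allowed_right_corpora_by_left; infer_instance

-- ===== CLAIM (what is proved, stated in full; the proofs are below) =====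
def Claim_equal_build_allowed_right_corpora_by_left : Prop := ∀ (left_corpora : List String) (right_corpora : List String) (mappings : List (List String × List String)), Dom_build_allowed_right_corpora_by_left left_corpora right_corpora mappings → Spec_build_allowed_right_corpora_by_left left_corpora right_corpora mappings (build_allowed_right_corpora_by_left left_corpora right_corpora mappings)

-- ===== LEMMAS AND PROOFS =====

-- set.update with a deduplicated argument is the same as with the raw list
theorem pv_update_ofList {s : PySem.Set String} (t : List String) :
    PySem.Set.update s (PySem.Set.ofList t) = PySem.Set.update s t := by
  rw [PySem.Set.update_eq_append_filter, PySem.Set.update_eq_append_filter,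
    PySem.Set.ofList_ofList]

-- updating twice with the same list is updating once
theorem pv_update_idem {s : PySem.Set String} (t : List String) :
    PySem.Set.update (PySem.Set.update s t) t = PySem.Set.update s t := by
  conv_lhs => rw [PySem.Set.update_eq_append_filter]
  have h : List.filter (fun y => !(PySem.Set.update s t).contains y) (PySem.Set.ofList t) = [] := by
    rw [List.filter_eq_nil_iff]
    intro a ha
    simp only [Bool.not_eq_true', Bool.not_eq_false]
    exact (PySem.Set.contains_iff _ _).2 ((PySem.Set.mem_update s t a).2
      (Or.inr ((PySem.Set.mem_ofList t a).1 ha)))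
  rw [h, List.append_nil]

-- the seeding loop of A: every value in the resulting dict is the empty set
theorem pv_seed_getD (l : List String) (d : PySem.Dict String (PySem.Set String))
    (h : ∀ j, d.getD j PySem.Set.empty = PySem.Set.empty) (k : String) :
    ((l.foldl (fun d lc => d.insert lc PySem.Set.empty) d).getD k PySem.Set.empty)
      = PySem.Set.empty := by
  induction l generalizing d with
  | nil => exact h k
  | cons x xs ih =>
      refine ih _ (fun j => ?_)
      rw [PySem.Dict.getD_insert]
      split <;> [rfl; exact h j]

-- inner loop of A's mapping sweep: effect on one present key
theorem pv_inner_getD (frm : List String) (t : List String)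
    (d : PySem.Dict String (PySem.Set String)) (k : String) (hk : d.contains k = true) :
    ((frm.foldl (fun d lc =>
        if d.contains lc then
          d.modify lc PySem.Set.empty (fun s => PySem.Set.update s t)
        else d) d).getD k PySem.Set.empty)
      = if k ∈ frm then PySem.Set.update (d.getD k PySem.Set.empty) t
        else d.getD k PySem.Set.empty := by
  induction frm generalizing d with
  | nil => simp
  | cons x xs ih =>
      simp only [List.foldl_cons, List.mem_cons]
      by_cases hx : k = x
      · subst hx
        rw [if_pos hk]
        rw [ih _ (by rw [PySem.Dict.contains_modify]; simp)]
        rw [PySem.Dict.getD_modify_self]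
        by_cases hxs : k ∈ xs
        · simp [hxs, pv_update_idem]
        · simp [hxs]
      · have hgd : ∀ d' : PySem.Dict String (PySem.Set String),
            (if d'.contains x = true then
              d'.modify x PySem.Set.empty (fun s => PySem.Set.update s t)
            else d').getD k PySem.Set.empty = d'.getD k PySem.Set.empty := by
          intro d'; split
          · exact PySem.Dict.getD_modify_of_ne d' _ _ hx
          · rfl
        have hc : (if d.contains x = true then
              d.modify x PySem.Set.empty (fun s => PySem.Set.update s t)
            else d).contains k = true := by
          split
          · rw [PySem.Dict.contains_modify]; simp [hk]
          · exact hk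
        rw [ih _ hc, hgd]
        simp [hx]

-- contains is preserved through the inner loop
theorem pv_inner_contains (frm : List String) (t : List String)
    (d : PySem.Dict String (PySem.Set String)) (k : String) (hk : d.contains k = true) :
    ((frm.foldl (fun d lc =>
        if d.contains lc then
          d.modify lc PySem.Set.empty (fun s => PySem.Set.update s t)
        else d) d).contains k) = true := by
  induction frm generalizing d with
  | nil => exact hk
  | cons x xs ih =>
      simp only [List.foldl_cons]
      refine ih _ ?_
      split
      · rw [PySem.Dict.contains_modify]; simp [hk]
      · exact hk

-- A's whole mapping sweep, seen from one present key, is B's per-key scan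
theorem pv_outer_getD (maps : List (List String × List String))
    (d : PySem.Dict String (PySem.Set String)) (k : String) (hk : d.contains k = true) :
    ((maps.foldl (fun d p =>
        let toSet := PySem.Set.ofList p.2
        p.1.foldl (fun d lc =>
          if d.contains lc then
            d.modify lc PySem.Set.empty (fun s => PySem.Set.update s toSet)
          else d) d) d).getD k PySem.Set.empty)
      = maps.foldl (fun s p => if p.1.contains k then PySem.Set.update s p.2 else s)
          (d.getD k PySem.Set.empty) := by
  induction maps generalizing d with
  | nil => rfl
  | cons p ps ih =>
      simp only [List.foldl_cons]
      rw [ih _ (pv_inner_contains _ _ _ _ hk)]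
      rw [pv_inner_getD _ _ _ _ hk]
      congr 1
      by_cases hm : k ∈ p.1
      · rw [if_pos hm, if_pos (List.contains_iff_mem.2 hm), pv_update_ofList]
      · rw [if_neg hm, if_neg (by simpa using hm)]

-- A's final fill loop, seen from one present key
theorem pv_fill_getD (l : List String) (rcs : List String)
    (d : PySem.Dict String (PySem.Set String)) (k : String) (hk : d.contains k = true) :
    ((l.foldl (fun d lc =>
        if (d.getD lc PySem.Set.empty).isEmpty then
          d.modify lc PySem.Set.empty (fun s => PySem.Set.update s rcs)
        else d) d).getD k PySem.Set.empty)
      = if k ∈ l ∧ (d.getD k PySem.Set.empty).isEmpty then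
          PySem.Set.update (d.getD k PySem.Set.empty) rcs
        else d.getD k PySem.Set.empty := by
  induction l generalizing d with
  | nil => simp
  | cons x xs ih =>
      simp only [List.foldl_cons, List.mem_cons]
      by_cases hx : k = x
      · subst hx
        by_cases he : (d.getD k PySem.Set.empty).isEmpty = true
        · rw [if_pos he]
          rw [ih _ (by rw [PySem.Dict.contains_modify]; simp)]
          rw [PySem.Dict.getD_modify_self]
          rw [if_pos (show (k = k ∨ k ∈ xs) ∧ (d.getD k PySem.Set.empty).isEmpty = true
            from ⟨Or.inl rfl, he⟩)]
          split
          · rw [pv_update_idem]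
          · rfl
        · rw [if_neg he, ih _ hk]
          simp only [List.isEmpty_iff, PySem.Set.empty] at he
          simp [he]
      · have hgd : ∀ d' : PySem.Dict String (PySem.Set String),
            (if (d'.getD x PySem.Set.empty).isEmpty = true then
              d'.modify x PySem.Set.empty (fun s => PySem.Set.update s rcs)
            else d').getD k PySem.Set.empty = d'.getD k PySem.Set.empty := by
          intro d'; split
          · exact PySem.Dict.getD_modify_of_ne d' _ _ hx
          · rfl
        have hc : (if (d.getD x PySem.Set.empty).isEmpty = true then
              d.modify x PySem.Set.empty (fun s => PySem.Set.update s rcs)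
            else d).contains k = true := by
          split
          · rw [PySem.Dict.contains_modify]; simp [hk]
          · exact hk
        rw [ih _ hc, hgd]
        simp [hx]

-- keys are preserved through the inner/outer/fill loops
theorem pv_keys_modify_guard (d : PySem.Dict String (PySem.Set String)) (lc : String)
    (f : PySem.Set String → PySem.Set String) (h : d.contains lc = true) :
    (d.modify lc PySem.Set.empty f).keys = d.keys := by
  rw [PySem.Dict.keys_modify, PySem.Dict.keys_insert_of_contains _ _ h]

theorem pv_inner_keys (frm : List String) (t : List String)
    (d : PySem.Dict String (PySem.Set String)) :
    ((frm.foldl (fun d lc =>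
        if d.contains lc then
          d.modify lc PySem.Set.empty (fun s => PySem.Set.update s t)
        else d) d).keys) = d.keys := by
  induction frm generalizing d with
  | nil => rfl
  | cons x xs ih =>
      simp only [List.foldl_cons]
      rw [ih]
      split
      · exact pv_keys_modify_guard _ _ _ (by assumption)
      · rfl

theorem pv_outer_keys (maps : List (List String × List String))
    (d : PySem.Dict String (PySem.Set String)) :
    ((maps.foldl (fun d p =>
        let toSet := PySem.Set.ofList p.2
        p.1.foldl (fun d lc =>
          if d.contains lc then
            d.modify lc PySem.Set.empty (fun s => PySem.Set.update s toSet)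
          else d) d) d).keys) = d.keys := by
  induction maps generalizing d with
  | nil => rfl
  | cons p ps ih =>
      simp only [List.foldl_cons]
      rw [ih, pv_inner_keys]

theorem pv_fill_keys (l : List String) (rcs : List String)
    (d : PySem.Dict String (PySem.Set String))
    (hl : ∀ x ∈ l, d.contains x = true) :
    ((l.foldl (fun d lc =>
        if (d.getD lc PySem.Set.empty).isEmpty then
          d.modify lc PySem.Set.empty (fun s => PySem.Set.update s rcs)
        else d) d).keys) = d.keys := by
  induction l generalizing d with
  | nil => rfl
  | cons x xs ih =>
      simp only [List.foldl_cons]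
      have hx := hl x (List.mem_cons_self ..)
      have hkeys : (if (d.getD x PySem.Set.empty).isEmpty = true then
            d.modify x PySem.Set.empty (fun s => PySem.Set.update s rcs)
          else d).keys = d.keys := by
        split
        · exact pv_keys_modify_guard _ _ _ hx
        · rfl
      rw [ih _ (fun y hy => by
        have := hl y (List.mem_cons_of_mem _ hy)
        rw [PySem.Dict.contains_iff_mem_keys, hkeys,
          ← PySem.Dict.contains_iff_mem_keys]
        exact this), hkeys]

-- B's dict: value at a key of the list, and at a key not in a suffix
theorem pv_alt_getD_not_mem (l : List String) (g : String → PySem.Set String)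
    (d : PySem.Dict String (PySem.Set String)) (k : String) (hk : k ∉ l) :
    ((l.foldl (fun d lc => d.insert lc (g lc)) d).getD k PySem.Set.empty)
      = d.getD k PySem.Set.empty := by
  induction l generalizing d with
  | nil => rfl
  | cons x xs ih =>
      simp only [List.foldl_cons]
      rw [ih _ (fun h => hk (List.mem_cons_of_mem _ h))]
      rw [PySem.Dict.getD_insert, if_neg (fun h => hk (List.mem_cons.2 (Or.inl h)))]

theorem pv_alt_getD (l : List String) (g : String → PySem.Set String)
    (d : PySem.Dict String (PySem.Set String)) (k : String) (hk : k ∈ l) :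
    ((l.foldl (fun d lc => d.insert lc (g lc)) d).getD k PySem.Set.empty) = g k := by
  induction l generalizing d with
  | nil => cases hk
  | cons x xs ih =>
      simp only [List.foldl_cons]
      by_cases hm : k ∈ xs
      · exact ih _ hm
      · have hx : k = x := by
          rcases List.mem_cons.1 hk with h | h
          · exact h
          · exact absurd h hm
        subst hx
        rw [pv_alt_getD_not_mem _ _ _ _ hm, PySem.Dict.getD_insert, if_pos rfl]

-- ===== VERDICT (by name: the statement is the Claim_ definition above) =====
theorem build_allowed_right_corpora_by_left_spec : Claim_equal_build_allowed_right_corpora_by_left := by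
  intro lcs rcs maps _
  unfold Spec_build_allowed_right_corpora_by_left
  unfold build_allowed_right_corpora_by_left build_allowed_right_corpora_by_left_alt
  simp only []
  -- names for the three stages of A and for B's dict
  set d1 := lcs.foldl (fun d lc => d.insert lc PySem.Set.empty)
    (PySem.Dict.empty : PySem.Dict String (PySem.Set String)) with hd1
  set d2 := maps.foldl (fun d p =>
      let toSet := PySem.Set.ofList p.2
      p.1.foldl (fun d lc =>
        if d.contains lc then
          d.modify lc PySem.Set.empty (fun s => PySem.Set.update s toSet)
        else d) d) d1 with hd2
  set d3 := lcs.foldl (fun d lc =>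
      if (d.getD lc PySem.Set.empty).isEmpty then
        d.modify lc PySem.Set.empty (fun s => PySem.Set.update s rcs)
      else d) d2 with hd3
  set dB := lcs.foldl (fun d lc => d.insert lc (pvAllowedFor rcs maps lc))
    (PySem.Dict.empty : PySem.Dict String (PySem.Set String)) with hdB
  have hk1 : d1.keys = PySem.Set.ofList lcs := by
    rw [hd1, PySem.Dict.keys_foldl_insert, PySem.Dict.keys_empty, PySem.Set.update_nil_left]
  have hk2 : d2.keys = PySem.Set.ofList lcs := by rw [hd2, pv_outer_keys, hk1]
  have hc2 : ∀ k ∈ lcs, d2.contains k = true := by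
    intro k hk
    rw [PySem.Dict.contains_iff_mem_keys, hk2, PySem.Set.mem_ofList]
    exact hk
  have hk3 : d3.keys = PySem.Set.ofList lcs := by
    rw [hd3, pv_fill_keys _ _ _ hc2, hk2]
  have hkB : dB.keys = PySem.Set.ofList lcs := by
    rw [hdB, PySem.Dict.keys_foldl_insert, PySem.Dict.keys_empty, PySem.Set.update_nil_left]
  -- pointwise values agree on the keys
  have hval : ∀ k ∈ lcs, d3.getD k PySem.Set.empty = dB.getD k PySem.Set.empty := by
    intro k hk
    have hc1 : d1.contains k = true := by
      rw [PySem.Dict.contains_iff_mem_keys, hk1, PySem.Set.mem_ofList]; exact hk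
    have hv1 : d1.getD k PySem.Set.empty = PySem.Set.empty := by
      rw [hd1]
      exact pv_seed_getD _ _ (fun j => PySem.Dict.getD_empty j _) k
    have hv2 : d2.getD k PySem.Set.empty
        = maps.foldl (fun s p => if p.1.contains k then PySem.Set.update s p.2 else s)
            PySem.Set.empty := by
      rw [hd2, pv_outer_getD _ _ _ hc1, hv1]
    rw [hd3, pv_fill_getD _ _ _ _ (hc2 k hk), hv2]
    rw [hdB, pv_alt_getD _ _ _ _ hk]
    simp only [pvAllowedFor]
    by_cases hS : (maps.foldl
        (fun s p => if p.1.contains k then PySem.Set.update s p.2 else s)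
        PySem.Set.empty).isEmpty = true
    · rw [if_pos ⟨hk, hS⟩, if_pos hS, List.isEmpty_iff.1 hS, PySem.Set.update_nil_left]
    · rw [if_neg (fun h => hS h.2), if_neg hS]
  -- items agree
  rw [PySem.Dict.items_eq_map_keys d3 (by rw [hk3]; exact PySem.Set.nodup_ofList lcs) PySem.Set.empty,
    PySem.Dict.items_eq_map_keys dB (by rw [hkB]; exact PySem.Set.nodup_ofList lcs) PySem.Set.empty,
    hk3, hkB]
  refine List.map_congr_left (fun k hkm => ?_)
  rw [hval k ((PySem.Set.mem_ofList lcs k).1 hkm)]
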